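-- pv_equiv track=rewrite | github.com/tenten1010/creativeInfo2014 | 20130802.py | isRange
-- ===== SOURCE A (Python) =====
-- def isCircle(i,j):
-- 	if (i-5)**2 + (j-5)**2 <= 5**2:
-- 		return True
-- 	else:
-- 		return False
--
-- def isRange(d):
-- 	r1,r0 = (0,0)
-- 	for i in range(11):
-- 		for j in range(11):
-- 			if i%d == 0 and j%d ==0:
-- 				if isCircle(i,j):
-- 					r1 += 1
-- 					r0 += 1
-- 				else:
-- 					r0 += 1
-- 			else:
-- 				pass
-- 	return (r1,r0)
-- ===== SOURCE B (Python) =====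
-- def isCircle(i, j):
--     if (i - 5) ** 2 + (j - 5) ** 2 <= 5 ** 2:
--         return True
--     else:
--         return False
--
-- def isRange(d):
--     idx = [i for i in range(11) if i % d == 0]
--     r0 = len(idx) ** 2
--     r1 = sum(1 for i in idx for j in idx if isCircle(i, j))
--     return (r1, r0)
-- ===== Notes on version B (the rewrite author's own statement) =====
-- stated objective: simpler
-- what changed: Builds the list of valid axis indices once, gets the total as its squared length in closed form, and sums the circle test only over valid index pairs, instead of testing divisibility inside a full 11x11 double loop.
import Mathlib
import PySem

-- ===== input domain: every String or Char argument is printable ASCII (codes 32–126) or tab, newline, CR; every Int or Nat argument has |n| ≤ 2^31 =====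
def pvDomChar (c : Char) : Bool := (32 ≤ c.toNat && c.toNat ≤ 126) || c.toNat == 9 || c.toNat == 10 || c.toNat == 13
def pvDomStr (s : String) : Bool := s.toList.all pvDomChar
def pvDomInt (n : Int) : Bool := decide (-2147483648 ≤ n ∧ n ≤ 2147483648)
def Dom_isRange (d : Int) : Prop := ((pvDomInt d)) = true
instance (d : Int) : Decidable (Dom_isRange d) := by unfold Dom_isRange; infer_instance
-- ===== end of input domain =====

-- B builds the valid axis-index list once, takes its squared length as the total, and sums the circle test
-- only over valid index pairs, instead of A's full 11x11 double loop with divisibility tests per cell ('simpler').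


-- ===== PORT A =====
def isCircleA (i j : Int) : Bool := decide ((i - 5) ^ 2 + (j - 5) ^ 2 ≤ 5 ^ 2)

def isRange (d : Int) : Int × Int :=
  (PySem.List.pyRange 0 11 1).foldl (fun (r : Int × Int) i =>
    (PySem.List.pyRange 0 11 1).foldl (fun (r : Int × Int) j =>
      if PySem.Int.mod i d = 0 ∧ PySem.Int.mod j d = 0 then
        if isCircleA i j then (r.1 + 1, r.2 + 1) else (r.1, r.2 + 1)
      else r) r) (0, 0)

-- ===== PORT B =====
def isCircleB (i j : Int) : Bool := decide ((i - 5) ^ 2 + (j - 5) ^ 2 ≤ 5 ^ 2)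

def isRange_alt (d : Int) : Int × Int :=
  let idx := (PySem.List.pyRange 0 11 1).filter (fun i => PySem.Int.mod i d == 0)
  let r0 : Int := (PySem.List.len idx) ^ 2
  let r1 : Int := (idx.flatMap (fun i => (idx.filter (fun j => isCircleB i j)).map (fun _ => (1 : Int)))).sum
  (r1, r0)

-- ===== PRECONDITION & SPEC =====
-- Pre_ excludes d = 0, on which Python A raises ZeroDivisionError (i % 0).
def Pre_isRange (d : Int) : Prop := d ≠ 0
instance (d : Int) : Decidable (Pre_isRange d) := by unfold Pre_isRange; infer_instance
def pvWitness_isRange : Int := 2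

def Spec_isRange (d : Int) (out : Int × Int) : Prop := out = isRange_alt d
instance (d : Int) (out : Int × Int) : Decidable (Spec_isRange d out) := by unfold Spec_isRange; infer_instance

-- ===== CLAIM (what is proved, stated in full; the proofs are below) =====
def Claim_equal_isRange : Prop := ∀ (d : Int), Dom_isRange d → Pre_isRange d → Spec_isRange d (isRange d)

-- ===== LEMMAS AND PROOFS =====

lemma pyRange_eleven : PySem.List.pyRange 0 11 1 = [0,1,2,3,4,5,6,7,8,9,10] := by decide

-- For |d| ≥ 11 the only index in 0..10 divisible by d is 0.
lemma mod_ne_of_big {d i : Int} (hd : 11 ≤ |d|) (h0 : 0 < i) (h10 : i ≤ 10) :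
    ¬ PySem.Int.mod i d = 0 := by
  rw [PySem.Int.mod_eq_zero_iff_dvd]
  intro hdvd
  have := Int.le_of_dvd h0 ((abs_dvd d i).mpr hdvd)
  omega

lemma big_eq (d : Int) (hd : 11 ≤ |d|) : isRange d = isRange_alt d := by
  have h0 : PySem.Int.mod 0 d = 0 := (PySem.Int.mod_eq_zero_iff_dvd 0 d).mpr ⟨0, by ring⟩
  have h1 := mod_ne_of_big hd (by norm_num : (0:Int) < 1) (by norm_num)
  have h2 := mod_ne_of_big hd (by norm_num : (0:Int) < 2) (by norm_num)
  have h3 := mod_ne_of_big hd (by norm_num : (0:Int) < 3) (by norm_num)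
  have h4 := mod_ne_of_big hd (by norm_num : (0:Int) < 4) (by norm_num)
  have h5 := mod_ne_of_big hd (by norm_num : (0:Int) < 5) (by norm_num)
  have h6 := mod_ne_of_big hd (by norm_num : (0:Int) < 6) (by norm_num)
  have h7 := mod_ne_of_big hd (by norm_num : (0:Int) < 7) (by norm_num)
  have h8 := mod_ne_of_big hd (by norm_num : (0:Int) < 8) (by norm_num)
  have h9 := mod_ne_of_big hd (by norm_num : (0:Int) < 9) (by norm_num)
  have h10 := mod_ne_of_big hd (by norm_num : (0:Int) < 10) (by norm_num)
  simp [isRange, isRange_alt, pyRange_eleven, h0, h1, h2, h3, h4, h5, h6, h7, h8, h9, h10,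
    isCircleA, isCircleB, PySem.List.len]

-- ===== VERDICT (by name: the statement is the Claim_ definition above) =====
set_option maxRecDepth 4000 in
theorem isRange_spec : Claim_equal_isRange := by
  intro d _ hd
  unfold Spec_isRange
  by_cases hsmall : -10 ≤ d ∧ d ≤ 10
  · obtain ⟨hl, hr⟩ := hsmall
    unfold Pre_isRange at hd
    interval_cases d <;> first | (exfalso; exact hd rfl) | decide
  · exact big_eq d (by
      unfold Pre_isRange at hd
      rcases abs_cases d with h | h <;> omega)
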